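-- pv_equiv track=rewrite | github.com/agencyenterprise/endogenous-steering-resistance | plotting/plot_exp10.py | is_degraded_output
-- ===== SOURCE A (Python) =====
-- def is_degraded_output(response: str, min_repeats: int = 5) -> bool:
--     """Check if a response is degraded (contains repetitive patterns)."""
--     words = response.split()
--     if len(words) < min_repeats:
--         return False
--
--     max_repeat = 1
--     current_repeat = 1
--
--     for i in range(1, len(words)):
--         if words[i] == words[i - 1] and len(words[i]) > 1:
--             current_repeat += 1
--             max_repeat = max(max_repeat, current_repeat)
--         else:
--             current_repeat = 1
--
--     return max_repeat >= min_repeats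
-- ===== SOURCE B (Python) =====
-- def _runs(words):
--     """Run-length encode the word list: list of (word, run_length)."""
--     runs = []
--     i = 0
--     n = len(words)
--     while i < n:
--         j = i
--         while j < n and words[j] == words[i]:
--             j += 1
--         runs.append((words[i], j - i))
--         i = j
--     return runs
--
--
-- def is_degraded_output(response: str, min_repeats: int = 5) -> bool:
--     """Check if a response is degraded (contains repetitive patterns)."""
--     words = response.split()
--     if len(words) < min_repeats:
--         return False
--     best = max([1] + [k for w, k in _runs(words) if len(w) > 1])
--     return best >= min_repeats
-- ===== Notes on version B (the rewrite author's own statement) =====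
-- stated objective: alternative
-- what changed: Replaces A's index loop with running current_repeat/max_repeat counters by run-length encoding the word list (a two-pointer while-loop) and taking the maximum run length among runs whose word is longer than one character.
import Mathlib
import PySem

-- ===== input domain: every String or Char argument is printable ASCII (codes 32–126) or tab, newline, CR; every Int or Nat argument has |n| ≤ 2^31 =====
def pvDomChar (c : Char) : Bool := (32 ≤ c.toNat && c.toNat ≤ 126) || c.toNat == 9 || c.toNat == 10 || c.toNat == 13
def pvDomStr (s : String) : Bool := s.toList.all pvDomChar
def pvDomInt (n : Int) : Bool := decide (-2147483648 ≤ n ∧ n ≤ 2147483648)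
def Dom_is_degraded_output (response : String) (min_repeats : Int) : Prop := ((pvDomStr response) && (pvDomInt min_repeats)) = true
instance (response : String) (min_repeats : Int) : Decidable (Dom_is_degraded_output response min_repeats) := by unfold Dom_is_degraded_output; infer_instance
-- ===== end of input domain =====

-- B replaces A's running max_repeat/current_repeat counter loop by run-length
-- encoding the word list and taking the max run length among words longer than
-- one character (objective: alternative decomposition, same result, same cost).

-- ===== PORT A =====
def is_degraded_output (response : String) (min_repeats : Int) : Bool :=
  let words := PySem.Str.split₀ response
  if ((words.length : Int) < min_repeats) then false
  else
    let st := (PySem.List.pyRange 1 (words.length : Int) 1).foldl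
      (fun (p : Int × Int) (i : Int) =>
        if (PySem.List.pyGetD words i "" == PySem.List.pyGetD words (i - 1) "")
            && decide (1 < PySem.Str.len (PySem.List.pyGetD words i "")) then
          (max p.1 (p.2 + 1), p.2 + 1)
        else
          (p.1, 1))
      ((1 : Int), (1 : Int))
    decide (min_repeats ≤ st.1)

-- ===== PORT B =====
-- transliteration of Source B's _runs: the inner 'while words[j] == words[i]' scan is
-- the takeWhile/dropWhile split of the remaining suffix at the current word
def pvRuns : List String → List (String × Int)
  | [] => []
  | w :: rest =>
      (w, (1 : Int) + (rest.takeWhile (· == w)).length) ::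
        pvRuns (rest.dropWhile (· == w))
  termination_by l => l.length
  decreasing_by
    simp only [List.length_cons]
    exact Nat.lt_succ_of_le (List.length_dropWhile_le _ _)

def is_degraded_output_alt (response : String) (min_repeats : Int) : Bool :=
  let words := PySem.Str.split₀ response
  if ((words.length : Int) < min_repeats) then false
  else
    -- max([1] + [k for w, k in _runs(words) if len(w) > 1]) as the running-max fold
    let best := (((pvRuns words).filter
        (fun p => decide (1 < PySem.Str.len p.1))).map (·.2)).foldl max (1 : Int)
    decide (min_repeats ≤ best)

-- ===== PRECONDITION & SPEC =====
def Spec_is_degraded_output (response : String) (min_repeats : Int) (out : Bool) : Prop := out = is_degraded_output_alt response min_repeats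
instance (response : String) (min_repeats : Int) (out : Bool) : Decidable (Spec_is_degraded_output response min_repeats out) := by unfold Spec_is_degraded_output; infer_instance

-- ===== CLAIM (what is proved, stated in full; the proofs are below) =====
def Claim_equal_is_degraded_output : Prop := ∀ (response : String) (min_repeats : Int), Dom_is_degraded_output response min_repeats → Spec_is_degraded_output response min_repeats (is_degraded_output response min_repeats)

-- ===== LEMMAS AND PROOFS =====

-- A's loop, restated structurally: prev = previous word, state (maxr, cur)
def pvLoopA (prev : String) : List String → Int → Int → Int
  | [], maxr, _ => maxr
  | x :: xs, maxr, cur =>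
      if (x == prev) && decide (1 < PySem.Str.len x) then
        pvLoopA x xs (max maxr (cur + 1)) (cur + 1)
      else
        pvLoopA x xs maxr 1

-- the "best run seen from here on, including the pending one of length cur"
def pvH (prev : String) : List String → Int → Int
  | [], cur => cur
  | x :: xs, cur =>
      if (x == prev) && decide (1 < PySem.Str.len x) then
        pvH x xs (cur + 1)
      else
        max cur (pvH x xs 1)

-- B's value on a word list
def pvMB (l : List String) : Int :=
  (((pvRuns l).filter (fun p => decide (1 < PySem.Str.len p.1))).map (·.2)).foldl max 1

theorem pvH_ge (l : List String) : ∀ (prev : String) (cur : Int), cur ≤ pvH prev l cur := by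
  induction l with
  | nil => intro prev cur; simp [pvH]
  | cons x xs ih =>
      intro prev cur
      simp only [pvH]
      split
      · exact le_trans (by omega) (ih x (cur + 1))
      · exact le_max_left _ _

theorem pvLoopA_eq (l : List String) : ∀ (prev : String) (maxr cur : Int),
    1 ≤ cur → cur ≤ maxr → pvLoopA prev l maxr cur = max maxr (pvH prev l cur) := by
  induction l with
  | nil => intro prev maxr cur h1 h2; simp [pvLoopA, pvH]; omega
  | cons x xs ih =>
      intro prev maxr cur h1 h2
      simp only [pvLoopA, pvH]
      split
      · rw [ih x _ _ (by omega) (le_max_right _ _)]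
        have := pvH_ge xs x (cur + 1)
        omega
      · rw [ih x _ _ (by omega) (by omega)]
        have := pvH_ge xs x 1
        omega

theorem pv_foldl_max_max (vs : List Int) : ∀ (a b : Int),
    vs.foldl max (max a b) = max a (vs.foldl max b) := by
  induction vs with
  | nil => intro a b; rfl
  | cons v vs ih =>
      intro a b
      simp only [List.foldl_cons, max_assoc]
      exact ih a (max b v)

theorem pvMB_ge_one (l : List String) : 1 ≤ pvMB l := by
  have h := (PySem.List.le_foldl_max
    (((pvRuns l).filter (fun p => decide (1 < PySem.Str.len p.1))).map (·.2)) 1).1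
  exact h

-- unfolding of pvMB on a nonempty list
theorem pvMB_cons (x : String) (xs : List String) :
    pvMB (x :: xs) =
      if 1 < PySem.Str.len x then
        max (1 + ((xs.takeWhile (· == x)).length : Int)) (pvMB (xs.dropWhile (· == x)))
      else
        pvMB (xs.dropWhile (· == x)) := by
  rw [pvMB]
  simp only [pvRuns]
  split_ifs with h
  · rw [List.filter_cons_of_pos (by simpa using h)]
    simp only [List.map_cons, List.foldl_cons]
    rw [max_comm (1 : Int), pv_foldl_max_max]
    rfl
  · rw [List.filter_cons_of_neg (by simpa using h)]
    rfl

theorem pv_key (l : List String) : ∀ (w : String) (cur : Int), 1 ≤ cur →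
    max cur (pvH w l cur) =
      if 1 < PySem.Str.len w then
        max (cur + ((l.takeWhile (· == w)).length : Int)) (pvMB (l.dropWhile (· == w)))
      else
        max cur (pvMB (l.dropWhile (· == w))) := by
  induction l with
  | nil =>
      intro w cur h1
      have h : pvMB [] = 1 := by simp [pvMB, pvRuns]
      simp only [pvH, List.takeWhile_nil, List.dropWhile_nil, List.length_nil,
        Nat.cast_zero, add_zero, h]
      split_ifs <;> omega
  | cons x xs ih =>
      intro w cur h1
      simp only [pvH]
      by_cases hx : (x == w) && decide (1 < PySem.Str.len x)
      · -- x equals prev and is long: the pending run continues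
        rw [if_pos hx]
        have hxw : x = w := eq_of_beq ((Bool.and_eq_true _ _).mp hx).1
        have hlen : 1 < PySem.Str.len x :=
          of_decide_eq_true ((Bool.and_eq_true _ _).mp hx).2
        subst hxw
        have hmax : max cur (pvH x xs (cur + 1)) = max (cur + 1) (pvH x xs (cur + 1)) := by
          have := pvH_ge xs x (cur + 1); omega
        rw [hmax, ih x (cur + 1) (by omega), if_pos hlen, if_pos hlen,
          List.takeWhile_cons_of_pos (by simp), List.dropWhile_cons_of_pos (by simp),
          List.length_cons]
        congr 1
        push_cast
        ring
      · -- the pending run ends here (different word, or a single-char word)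
        rw [if_neg hx]
        have hrec : max (1 : Int) (pvH x xs 1) = pvMB (x :: xs) := by
          rw [ih x 1 (by omega), pvMB_cons]
          split_ifs with hl
          · rfl
          · have := pvMB_ge_one (xs.dropWhile (· == x)); omega
        have habs : max cur (max cur (pvH x xs 1)) = max cur (max 1 (pvH x xs 1)) := by
          have := pvH_ge xs x 1; omega
        rw [habs, hrec]
        by_cases hxw : (x == w : Bool)
        · -- same word but single char: both sides just pass the run
          have hxw' : x = w := eq_of_beq hxw
          have hlen : ¬ 1 < PySem.Str.len x := by
            intro hc
            rw [PySem.Str.len_eq] at hc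
            exact hx (by simp [hxw]; exact_mod_cast hc)
          subst hxw'
          rw [if_neg hlen, List.dropWhile_cons_of_pos (by simp), pvMB_cons,
            if_neg hlen]
        · -- different word: the rest starts a fresh run list
          rw [List.takeWhile_cons_of_neg (by simpa using hxw),
            List.dropWhile_cons_of_neg (by simpa using hxw)]
          split_ifs with hl
          · simp
          · rfl

-- A's index fold over the full word list equals the structural loop pvLoopA
theorem pv_fold_eq_loopA (l : List String) : ∀ (pre : List String) (hpre : pre ≠ [])
    (maxr cur : Int),
    ((PySem.List.pyRange (pre.length : Int) ((pre.length + l.length : Nat) : Int) 1).foldl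
      (fun (p : Int × Int) (i : Int) =>
        if (PySem.List.pyGetD (pre ++ l) i "" == PySem.List.pyGetD (pre ++ l) (i - 1) "")
            && decide (1 < PySem.Str.len (PySem.List.pyGetD (pre ++ l) i "")) then
          (max p.1 (p.2 + 1), p.2 + 1)
        else
          (p.1, 1)) (maxr, cur)).1
    = pvLoopA (pre.getLast hpre) l maxr cur := by
  induction l with
  | nil =>
      intro pre hpre maxr cur
      rw [PySem.List.pyRange_one_eq_nil (by simp)]
      rfl
  | cons x xs ih =>
      intro pre hpre maxr cur
      rw [PySem.List.pyRange_one_cons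
        (by simp only [List.length_cons]; push_cast; omega)]
      simp only [List.foldl_cons]
      -- evaluate the two lookups at index pre.length
      have hget : PySem.List.pyGetD (pre ++ x :: xs) (pre.length : Int) "" = x := by
        rw [PySem.List.pyGetD_natCast]
        simp [List.getD]
      have hlen1 : 1 ≤ pre.length := List.length_pos_iff.mpr hpre
      have hprev : PySem.List.pyGetD (pre ++ x :: xs) ((pre.length : Int) - 1) ""
          = pre.getLast hpre := by
        rw [show (pre.length : Int) - 1 = ((pre.length - 1 : Nat) : Int) by omega,
          PySem.List.pyGetD_natCast]
        rw [List.getD, List.getElem?_append_left (by omega),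
          List.getElem?_eq_getElem (by omega)]
        simp [List.getLast_eq_getElem]
      rw [hget, hprev]
      have harith : ((pre.length : Int) + 1) = (((pre ++ [x]).length : Nat) : Int) := by
        simp
      have harith2 : ((pre.length + (x :: xs).length : Nat) : Int)
          = (((pre ++ [x]).length + xs.length : Nat) : Int) := by
        simp only [List.length_append, List.length_cons, List.length_nil]
        push_cast
        ring
      have hwords : pre ++ x :: xs = (pre ++ [x]) ++ xs := by simp
      simp only [pvLoopA]
      split
      · rw [harith, harith2, hwords,
          ih (pre ++ [x]) (by simp) (max maxr (cur + 1)) (cur + 1)]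
        congr 1
        simp
      · rw [harith, harith2, hwords, ih (pre ++ [x]) (by simp) maxr 1]
        congr 1
        simp

-- both programs compute pvMB words after the guard
theorem pv_A_val (words : List String) :
    ((PySem.List.pyRange 1 (words.length : Int) 1).foldl
      (fun (p : Int × Int) (i : Int) =>
        if (PySem.List.pyGetD words i "" == PySem.List.pyGetD words (i - 1) "")
            && decide (1 < PySem.Str.len (PySem.List.pyGetD words i "")) then
          (max p.1 (p.2 + 1), p.2 + 1)
        else
          (p.1, 1)) ((1 : Int), (1 : Int))).1 = pvMB words := by
  cases words with
  | nil =>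
      rw [PySem.List.pyRange_one_eq_nil (by simp)]
      simp only [pvMB, pvRuns, List.filter_nil, List.map_nil, List.foldl_nil]
  | cons w rest =>
      have h := pv_fold_eq_loopA rest [w] (by simp) 1 1
      simp only [List.getLast_singleton] at h
      rw [show [w].length + rest.length = (w :: rest).length from by
        simp [Nat.add_comm]] at h
      rw [pvLoopA_eq rest w 1 1 (by omega) (by omega)] at h
      have hMB : max (1 : Int) (pvH w rest 1) = pvMB (w :: rest) := by
        rw [pv_key rest w 1 (by omega), pvMB_cons]
        split_ifs with hl
        · rfl
        · have := pvMB_ge_one (rest.dropWhile (· == w))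
          omega
      exact h.trans hMB

-- ===== VERDICT (by name: the statement is the Claim_ definition above) =====
theorem is_degraded_output_spec : Claim_equal_is_degraded_output := by
  intro response min_repeats _
  unfold Spec_is_degraded_output is_degraded_output is_degraded_output_alt
  simp only
  split
  · rfl
  · rw [pv_A_val]
    rfl
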